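-- pv_equiv track=rewrite | github.com/EladAriel/CS-Academic-Projects | Data Structures and Algorithms/Max_Min_Heap/helper_functions.py | get_max_child
-- ===== SOURCE A (Python) =====
-- def leftChild(i):
--     """
--     Args:
--         i (int): Index of the node.
--
--     Returns:
--         int: The position of the left child for node i.
--     """
--     return 2 * i + 1
--
-- def rightChild(i):
--     """
--     Args:
--         i (int): Index of the node.
--
--     Returns:
--         int: The position of the right child for node i.
--     """
--     return 2 * i + 2
--
-- def get_max_child(A, i, n):
--     """
--     Given a binary tree represented by a array A and an index i,
--     return the index of the maximum child or grandchild of node i.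
--
--     Args:
--         A (list): An array representing the binary tree.
--         i (int): Index of the node for which to find the maximum child or grandchild.
--         n (int): The length of the heap.
--
--     Returns:
--         int: Index of the maximum child or grandchild of node i.
--     """
--     # Check if i is a valid index
--     if i >= n:
--         return None
--     # Calculate indices of left and right children of node i
--     left_child = leftChild(i)
--     right_child = rightChild(i)
--     # Initialize max_idx as i
--     max_idx = i
--     # Check if left child is larger than max_val
--     if left_child < n:
--         left_idx = get_max_child(A, left_child, n)
--         if A[left_idx] > A[max_idx]:
--             max_idx = left_idx
--     # Check if right child is larger than max_val
--     if right_child < n: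
--         right_idx = get_max_child(A, right_child, n)
--         if A[right_idx] > A[max_idx]:
--             max_idx = right_idx
--     return max_idx
-- ===== SOURCE B (Python) =====
-- def get_max_child(A, i, n):
--     """Index of the maximum element in the subtree rooted at i (heap of size n),
--     by an explicit stack-based preorder DFS instead of recursion.
--     Strict '>' keeps the earliest preorder node on ties, matching the recursion."""
--     if i >= n:
--         return None
--     best = i
--     stack = [i]
--     while stack:
--         node = stack.pop()
--         if A[node] > A[best]:
--             best = node
--         right = 2 * node + 2
--         left = 2 * node + 1
--         if right < n:
--             stack.append(right)
--         if left < n: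
--             stack.append(left)
--     return best
-- ===== Notes on version B (the rewrite author's own statement) =====
-- stated objective: alternative
-- what changed: Replaces A's recursion over both children with an explicit stack-based preorder DFS loop (push right then left, strict '>' update), visiting the same nodes in the same order without recursion.
-- outside the precondition, e.g. on get_max_child([], 0, 1): A returns 0, B raises IndexError
import Mathlib
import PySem

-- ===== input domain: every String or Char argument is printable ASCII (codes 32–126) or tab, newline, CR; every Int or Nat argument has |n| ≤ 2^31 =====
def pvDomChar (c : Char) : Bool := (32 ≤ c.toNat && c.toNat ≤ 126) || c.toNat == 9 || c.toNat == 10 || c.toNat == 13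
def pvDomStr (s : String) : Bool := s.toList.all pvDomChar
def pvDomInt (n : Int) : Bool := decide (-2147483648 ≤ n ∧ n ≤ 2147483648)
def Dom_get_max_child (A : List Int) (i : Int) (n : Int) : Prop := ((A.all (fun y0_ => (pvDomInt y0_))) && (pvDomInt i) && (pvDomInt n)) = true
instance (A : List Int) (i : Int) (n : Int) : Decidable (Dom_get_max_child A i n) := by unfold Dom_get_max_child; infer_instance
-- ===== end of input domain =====

-- B replaces A's recursion with an explicit stack-based preorder DFS loop: a different
-- decomposition of the same traversal, at the same cost (objective: alternative).


-- ===== PORT A =====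
def leftChild (i : Int) : Int := 2 * i + 1
def rightChild (i : Int) : Int := 2 * i + 2

-- A's recursion, with a fuel counter as the totality device: under Pre_ (0 ≤ i) every
-- recursive call strictly increases i, so depth ≤ (n - i).toNat and the fuel supplied by
-- the wrapper is never exhausted (outside Pre_, Python's recursion does not terminate).
-- A[j] is ported as pyGetD j 0: under Pre_ every accessed index satisfies 0 ≤ j < n ≤ |A|.
def getMaxChildGo (A : List Int) (n : Int) : Nat → Int → Option Int
  | 0, _ => none
  | fuel + 1, i =>
    if i ≥ n then none
    else
      let left_child := leftChild i
      let right_child := rightChild i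
      let m1 : Int :=
        if left_child < n then
          match getMaxChildGo A n fuel left_child with
          | some left_idx => if PySem.List.pyGetD A left_idx 0 > PySem.List.pyGetD A i 0 then left_idx else i
          | none => i
        else i
      let m2 : Int :=
        if right_child < n then
          match getMaxChildGo A n fuel right_child with
          | some right_idx => if PySem.List.pyGetD A right_idx 0 > PySem.List.pyGetD A m1 0 then right_idx else m1
          | none => m1
        else m1
      some m2

def get_max_child (A : List Int) (i : Int) (n : Int) : Option Int :=
  getMaxChildGo A n ((n - i).toNat + 1) i

-- ===== PORT B =====
-- B's while-loop over an explicit stack; head of the list is the top of the stack.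
-- Fuel bounds the number of pops: the subtree explored from i has fewer than
-- 2 ^ (n - i).toNat nodes (outside Pre_, Python's loop does not terminate).
def getMaxChildLoop (A : List Int) (n : Int) : Nat → List Int → Int → Int
  | 0, _, best => best
  | _ + 1, [], best => best
  | fuel + 1, node :: stack, best =>
    let best' := if PySem.List.pyGetD A node 0 > PySem.List.pyGetD A best 0 then node else best
    let stack1 := if 2 * node + 2 < n then (2 * node + 2) :: stack else stack
    let stack2 := if 2 * node + 1 < n then (2 * node + 1) :: stack1 else stack1
    getMaxChildLoop A n fuel stack2 best'

def get_max_child_alt (A : List Int) (i : Int) (n : Int) : Option Int :=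
  if i ≥ n then none
  else some (getMaxChildLoop A n (2 ^ (n - i).toNat) [i] i)

-- ===== PRECONDITION & SPEC =====
-- Pre_ excludes i < 0 < n (both programs loop forever: the left-child chain from a negative
-- index never leaves the tree) and n > len(A), an invalid heap description on which both
-- programs generally raise IndexError (A can return without indexing only on the degenerate
-- singleton subtree, e.g. A = [], i = 0, n = 1, where B raises).
def Pre_get_max_child (A : List Int) (i : Int) (n : Int) : Prop :=
  n ≤ i ∨ (0 ≤ i ∧ n ≤ (A.length : Int))
instance (A : List Int) (i : Int) (n : Int) : Decidable (Pre_get_max_child A i n) := by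
  unfold Pre_get_max_child; infer_instance

def pvWitness_get_max_child : List Int × Int × Int := ([3, 7, 5, 7, 1], 0, 5)

def Spec_get_max_child (A : List Int) (i : Int) (n : Int) (out : Option Int) : Prop := out = get_max_child_alt A i n
instance (A : List Int) (i : Int) (n : Int) (out : Option Int) : Decidable (Spec_get_max_child A i n out) := by unfold Spec_get_max_child; infer_instance

-- ===== CLAIM (what is proved, stated in full; the proofs are below) =====
def Claim_equal_get_max_child : Prop := ∀ (A : List Int) (i : Int) (n : Int), Dom_get_max_child A i n → Pre_get_max_child A i n → Spec_get_max_child A i n (get_max_child A i n)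

-- ===== LEMMAS AND PROOFS =====

-- The one-step update both programs perform: keep the later index only if strictly larger.
def pstep (A : List Int) (b j : Int) : Int := if PySem.List.pyGetD A j 0 > PySem.List.pyGetD A b 0 then j else b

-- Preorder listing of the subtree rooted at i inside [0, n), with fuel.
def preo (n : Int) : Nat → Int → List Int
  | 0, _ => []
  | f + 1, i => if i < n then i :: (preo n f (2 * i + 1) ++ preo n f (2 * i + 2)) else []

theorem preo_irrel (n : Int) : ∀ (k : Nat) (i : Int) (f g : Nat), (n - i).toNat ≤ k → 0 ≤ i →
    (n - i).toNat ≤ f → (n - i).toNat ≤ g → preo n f i = preo n g i := by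
  intro k
  induction k with
  | zero =>
    intro i f g hk hi hf hg
    have hin : ¬ i < n := by omega
    cases f <;> cases g <;> simp [preo, hin]
  | succ k ih =>
    intro i f g hk hi hf hg
    by_cases hin : i < n
    · have h1 : (n - i).toNat ≥ 1 := by omega
      obtain ⟨f', rfl⟩ : ∃ f', f = f' + 1 := ⟨f - 1, by omega⟩
      obtain ⟨g', rfl⟩ : ∃ g', g = g' + 1 := ⟨g - 1, by omega⟩
      simp only [preo, if_pos hin]
      rw [ih (2 * i + 1) f' g' (by omega) (by omega) (by omega) (by omega),
          ih (2 * i + 2) f' g' (by omega) (by omega) (by omega) (by omega)]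
    · cases f <;> cases g <;> simp [preo, hin]

theorem preo_nil (n : Int) (f : Nat) (i : Int) (h : ¬ i < n) : preo n f i = [] := by
  cases f <;> simp [preo, h]

theorem preo_len (n : Int) : ∀ (k : Nat) (i : Int) (f : Nat), (n - i).toNat ≤ k → 0 ≤ i →
    (preo n f i).length + 1 ≤ 2 ^ (n - i).toNat := by
  intro k
  induction k with
  | zero =>
    intro i f hk hi
    have hin : ¬ i < n := by omega
    simp [preo_nil n f i hin, Nat.one_le_two_pow]
  | succ k ih =>
    intro i f hk hi
    by_cases hin : i < n
    · cases f with
      | zero => simp [preo, Nat.one_le_two_pow]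
      | succ f' =>
        simp only [preo, if_pos hin, List.length_cons, List.length_append]
        have hl := ih (2 * i + 1) f' (by omega) (by omega)
        have hr := ih (2 * i + 2) f' (by omega) (by omega)
        have h1 : (n - i).toNat ≥ 1 := by omega
        have hml : 2 ^ (n - (2 * i + 1)).toNat ≤ 2 ^ ((n - i).toNat - 1) :=
          Nat.pow_le_pow_right (by omega) (by omega)
        have hmr : 2 ^ (n - (2 * i + 2)).toNat ≤ 2 ^ ((n - i).toNat - 1) :=
          Nat.pow_le_pow_right (by omega) (by omega)
        have hsplit : 2 ^ ((n - i).toNat - 1) * 2 = 2 ^ (n - i).toNat := by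
          rw [← pow_succ]; congr 1; omega
        omega
    · simp [preo_nil n f i hin, Nat.one_le_two_pow]

theorem pstep_assoc (A : List Int) (a x y : Int) :
    pstep A (pstep A a x) y = pstep A a (pstep A x y) := by
  unfold pstep; split_ifs <;> omega

theorem foldl_pstep_cons (A : List Int) : ∀ (xs : List Int) (a x : Int),
    List.foldl (pstep A) (pstep A a x) xs = pstep A a (List.foldl (pstep A) x xs) := by
  intro xs
  induction xs with
  | nil => intro a x; rfl
  | cons y ys ih =>
    intro a x
    simp only [List.foldl_cons, pstep_assoc A a x y, ih]

-- A's recursion computes the fold of pstep over the preorder of the two child subtrees.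
theorem getMaxChildGo_eq (A : List Int) (n : Int) : ∀ (k : Nat) (i : Int) (f : Nat),
    (n - i).toNat ≤ k → 0 ≤ i → (n - i).toNat ≤ f →
    getMaxChildGo A n (f + 1) i =
      if i < n then
        some (List.foldl (pstep A) i (preo n f (2 * i + 1) ++ preo n f (2 * i + 2)))
      else none := by
  intro k
  induction k with
  | zero =>
    intro i f hk hi hf
    have hin : ¬ i < n := by omega
    rw [if_neg hin]
    conv_lhs => rw [getMaxChildGo]
    rw [if_pos (by omega : i ≥ n)]
  | succ k ih =>
    intro i f hk hi hf
    by_cases hin : i < n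
    · have h1 : (n - i).toNat ≥ 1 := by omega
      obtain ⟨f', rfl⟩ : ∃ f', f = f' + 1 := ⟨f - 1, by omega⟩
      rw [if_pos hin]
      conv_lhs => rw [getMaxChildGo]
      rw [if_neg (by omega : ¬ i ≥ n)]
      simp only [leftChild, rightChild]
      have hstep1 : (if 2 * i + 1 < n then
            match getMaxChildGo A n (f' + 1) (2 * i + 1) with
            | some left_idx => if PySem.List.pyGetD A left_idx 0 > PySem.List.pyGetD A i 0 then left_idx else i
            | none => i
          else i) = List.foldl (pstep A) i (preo n (f' + 1) (2 * i + 1)) := by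
        by_cases hl : 2 * i + 1 < n
        · rw [if_pos hl, ih (2 * i + 1) f' (by omega) (by omega) (by omega), if_pos hl]
          show pstep A i _ = _
          rw [← foldl_pstep_cons A _ i (2 * i + 1)]
          simp [preo, if_pos hl]
        · rw [if_neg hl, preo_nil n (f' + 1) _ hl]; rfl
      rw [hstep1]
      have hstep2 : ∀ m1 : Int, (if 2 * i + 2 < n then
            match getMaxChildGo A n (f' + 1) (2 * i + 2) with
            | some right_idx => if PySem.List.pyGetD A right_idx 0 > PySem.List.pyGetD A m1 0 then right_idx else m1
            | none => m1
          else m1) = List.foldl (pstep A) m1 (preo n (f' + 1) (2 * i + 2)) := by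
        intro m1
        by_cases hr : 2 * i + 2 < n
        · rw [if_pos hr, ih (2 * i + 2) f' (by omega) (by omega) (by omega), if_pos hr]
          show pstep A m1 _ = _
          rw [← foldl_pstep_cons A _ m1 (2 * i + 2)]
          simp [preo, if_pos hr]
        · rw [if_neg hr, preo_nil n (f' + 1) _ hr]; rfl
      rw [hstep2, ← List.foldl_append]
    · rw [if_neg hin]
      conv_lhs => rw [getMaxChildGo]
      rw [if_pos (by omega : i ≥ n)]

-- B's stack loop folds pstep over the concatenated preorders of the stacked subtrees.
theorem getMaxChildLoop_eq (A : List Int) (n : Int) (hn : 1 ≤ n) :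
    ∀ (f : Nat) (s : List Int) (b : Int),
    (∀ x ∈ s, 0 ≤ x ∧ x < n) →
    (s.map fun x => (preo n n.toNat x).length).sum ≤ f →
    getMaxChildLoop A n f s b = List.foldl (pstep A) b (s.map (preo n n.toNat)).flatten := by
  intro f
  induction f with
  | zero =>
    intro s b hs hsum
    cases s with
    | nil => rfl
    | cons x rest =>
      exfalso
      obtain ⟨hx0, hxn⟩ := hs x (by simp)
      obtain ⟨N', hN⟩ : ∃ N', n.toNat = N' + 1 := ⟨n.toNat - 1, by omega⟩
      have hlen : (preo n n.toNat x).length ≥ 1 := by rw [hN]; simp [preo, hxn]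
      simp only [List.map_cons, List.sum_cons] at hsum
      omega
  | succ f ih =>
    intro s b hs hsum
    cases s with
    | nil => rfl
    | cons x rest =>
      obtain ⟨hx0, hxn⟩ := hs x (by simp)
      obtain ⟨N', hN⟩ : ∃ N', n.toNat = N' + 1 := ⟨n.toNat - 1, by omega⟩
      have hrest : ∀ y ∈ rest, 0 ≤ y ∧ y < n := fun y hy => hs y (List.mem_cons_of_mem _ hy)
      have hirr : ∀ y : Int, 1 ≤ y → preo n N' y = preo n n.toNat y := by
        intro y hy
        by_cases hyn : y < n
        · exact preo_irrel n (n - y).toNat y N' n.toNat le_rfl (by omega) (by omega) (by omega)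
        · rw [preo_nil n N' y hyn, preo_nil n n.toNat y hyn]
      have hxpre : preo n n.toNat x =
          x :: (preo n n.toNat (2 * x + 1) ++ preo n n.toNat (2 * x + 2)) := by
        conv_lhs => rw [hN]
        simp only [preo, if_pos hxn]
        rw [hirr (2 * x + 1) (by omega), hirr (2 * x + 2) (by omega)]
      have hlenx : (preo n n.toNat x).length =
          1 + (preo n n.toNat (2 * x + 1)).length + (preo n n.toNat (2 * x + 2)).length := by
        rw [hxpre]; simp [List.length_append]; omega
      simp only [List.map_cons, List.sum_cons] at hsum
      have hmem : ∀ y ∈ (if 2 * x + 1 < n then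
            (2 * x + 1) :: (if 2 * x + 2 < n then (2 * x + 2) :: rest else rest)
          else (if 2 * x + 2 < n then (2 * x + 2) :: rest else rest)), 0 ≤ y ∧ y < n := by
        intro y hy
        split_ifs at hy with h1 h2 h2
        · rcases List.mem_cons.mp hy with rfl | hy'
          · exact ⟨by omega, by omega⟩
          · rcases List.mem_cons.mp hy' with rfl | hy''
            · exact ⟨by omega, by omega⟩
            · exact hrest y hy''
        · rcases List.mem_cons.mp hy with rfl | hy'
          · exact ⟨by omega, by omega⟩
          · exact hrest y hy'
        · rcases List.mem_cons.mp hy with rfl | hy'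
          · exact ⟨by omega, by omega⟩
          · exact hrest y hy'
        · exact hrest y hy
      have hfuel : ((if 2 * x + 1 < n then
            (2 * x + 1) :: (if 2 * x + 2 < n then (2 * x + 2) :: rest else rest)
          else (if 2 * x + 2 < n then (2 * x + 2) :: rest else rest)).map
            fun y => (preo n n.toNat y).length).sum ≤ f := by
        split_ifs with h1 h2 h2
        · simp only [List.map_cons, List.sum_cons]; omega
        · have h0 : (preo n n.toNat (2 * x + 2)).length = 0 := by
            rw [preo_nil n n.toNat _ h2]; rfl
          simp only [List.map_cons, List.sum_cons]; omega
        · have h0 : (preo n n.toNat (2 * x + 1)).length = 0 := by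
            rw [preo_nil n n.toNat _ h1]; rfl
          simp only [List.map_cons, List.sum_cons]; omega
        · have h0 : (preo n n.toNat (2 * x + 1)).length = 0 := by
            rw [preo_nil n n.toNat _ h1]; rfl
          have h0' : (preo n n.toNat (2 * x + 2)).length = 0 := by
            rw [preo_nil n n.toNat _ h2]; rfl
          omega
      have hflat : (((if 2 * x + 1 < n then
            (2 * x + 1) :: (if 2 * x + 2 < n then (2 * x + 2) :: rest else rest)
          else (if 2 * x + 2 < n then (2 * x + 2) :: rest else rest)).map
            (preo n n.toNat)).flatten) =
          preo n n.toNat (2 * x + 1) ++ preo n n.toNat (2 * x + 2) ++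
            (rest.map (preo n n.toNat)).flatten := by
        split_ifs with h1 h2 h2
        · simp [List.append_assoc]
        · rw [preo_nil n n.toNat (2 * x + 2) h2]; simp
        · rw [preo_nil n n.toNat (2 * x + 1) h1]; simp
        · rw [preo_nil n n.toNat (2 * x + 1) h1, preo_nil n n.toNat (2 * x + 2) h2]; simp
      show getMaxChildLoop A n f
          (if 2 * x + 1 < n then
            (2 * x + 1) :: (if 2 * x + 2 < n then (2 * x + 2) :: rest else rest)
          else (if 2 * x + 2 < n then (2 * x + 2) :: rest else rest))
          (pstep A b x) = _
      rw [ih _ _ hmem hfuel, hflat]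
      simp only [List.map_cons, List.flatten_cons, hxpre, List.foldl_cons, List.cons_append,
        List.append_assoc]

theorem pstep_self (A : List Int) (x : Int) : pstep A x x = x := by
  unfold pstep; split_ifs <;> omega

-- ===== VERDICT (by name: the statement is the Claim_ definition above) =====
theorem get_max_child_spec : Claim_equal_get_max_child := by
  intro A i n _ hpre
  unfold Spec_get_max_child get_max_child get_max_child_alt
  by_cases hin : i ≥ n
  · rw [if_pos hin]
    conv_lhs => rw [getMaxChildGo]
    rw [if_pos hin]
  · have hin : i < n := lt_of_not_ge hin
    have hi0 : 0 ≤ i := by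
      rcases hpre with h | ⟨h, _⟩
      · omega
      · exact h
    have hn1 : 1 ≤ n := by omega
    rw [if_neg (by omega : ¬ i ≥ n)]
    rw [getMaxChildGo_eq A n (n - i).toNat i (n - i).toNat (le_refl _) hi0 (le_refl _),
        if_pos hin]
    have hfuel : (([i].map fun x => (preo n n.toNat x).length).sum) ≤ 2 ^ (n - i).toNat := by
      have := preo_len n (n - i).toNat i n.toNat (le_refl _) hi0
      simp only [List.map_cons, List.map_nil, List.sum_cons, List.sum_nil]
      omega
    rw [getMaxChildLoop_eq A n hn1 (2 ^ (n - i).toNat) [i] i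
        (by intro x hx; simp at hx; subst hx; exact ⟨hi0, hin⟩) hfuel]
    obtain ⟨N', hN⟩ : ∃ N', n.toNat = N' + 1 := ⟨n.toNat - 1, by omega⟩
    have hirr : ∀ y : Int, 1 ≤ y → i ≤ y → preo n N' y = preo n (n - i).toNat y := by
      intro y hy hiy
      by_cases hyn : y < n
      · exact preo_irrel n (n - y).toNat y N' (n - i).toNat le_rfl (by omega) (by omega)
          (by omega)
      · rw [preo_nil n N' y hyn, preo_nil n (n - i).toNat y hyn]
    have hxpre : preo n n.toNat i =
        i :: (preo n (n - i).toNat (2 * i + 1) ++ preo n (n - i).toNat (2 * i + 2)) := by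
      conv_lhs => rw [hN]
      simp only [preo, if_pos hin]
      rw [hirr (2 * i + 1) (by omega) (by omega), hirr (2 * i + 2) (by omega) (by omega)]
    simp only [List.map_cons, List.map_nil, List.flatten_cons, List.flatten_nil,
      List.append_nil, hxpre, List.foldl_cons, pstep_self]
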